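-- pv_equiv track=rewrite | github.com/whimsical-c4lic0/fansly-scraper | scripts/ws_monitor.py | _unscramble_token
-- ===== SOURCE A (Python) =====
-- def _unscramble_token(token: str) -> str:
--     """Unscramble a Fansly token if it has the scramble suffix."""
--     scramble_suffix = "fNs"
--     if not token.endswith(scramble_suffix):
--         return token
--
--     scrambled_token = token[: -len(scramble_suffix)]
--     unscrambled_chars = [""] * len(scrambled_token)
--     step_size = 7
--     scrambled_index = 0
--
--     for offset in range(step_size):
--         for result_position in range(offset, len(unscrambled_chars), step_size):
--             unscrambled_chars[result_position] = scrambled_token[scrambled_index]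
--             scrambled_index += 1
--
--     return "".join(unscrambled_chars)
-- ===== SOURCE B (Python) =====
-- def _unscramble_token(token: str) -> str:
--     """Unscramble a Fansly token if it has the scramble suffix.
--
--     Different decomposition: instead of scattering characters into a
--     preallocated array with strided index writes, cut the scrambled part
--     into the 7 consecutive stride chunks and read them back round-robin
--     (a transpose / interleave), appending to an output list.
--     """
--     if not token.endswith("fNs"):
--         return token
--
--     s = token[:-3]
--     n = len(s)
--
--     # pass 1: slice out the 7 consecutive stride chunks
--     chunks = []
--     cursor = 0
--     for i in range(7):
--         size = len(range(i, n, 7))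
--         chunks.append(s[cursor:cursor + size])
--         cursor += size
--
--     # pass 2: interleave the chunks round-robin
--     out = []
--     for q in range((n + 6) // 7):
--         for c in chunks:
--             if q < len(c):
--                 out.append(c[q])
--     return "".join(out)
-- ===== Notes on version B (the rewrite author's own statement) =====
-- stated objective: alternative
-- what changed: Replaces the preallocated array filled by strided index assignment (inner loop range(offset, n, 7) with a running scrambled_index) with two passes: slice the scrambled part into the 7 consecutive stride chunks, then read the chunks back round-robin (a transpose/interleave) appending to an output list.
import Mathlib
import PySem

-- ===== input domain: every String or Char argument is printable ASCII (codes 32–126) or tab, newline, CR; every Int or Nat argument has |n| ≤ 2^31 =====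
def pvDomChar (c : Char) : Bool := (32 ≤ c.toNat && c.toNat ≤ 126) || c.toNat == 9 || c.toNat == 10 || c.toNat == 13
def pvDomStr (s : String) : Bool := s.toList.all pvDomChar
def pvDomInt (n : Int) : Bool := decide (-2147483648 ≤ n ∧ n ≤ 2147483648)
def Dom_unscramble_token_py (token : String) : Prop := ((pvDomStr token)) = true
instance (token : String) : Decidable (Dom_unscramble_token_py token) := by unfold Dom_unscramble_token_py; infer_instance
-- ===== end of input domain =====

-- B rebuilds the token by slicing the 7 consecutive stride chunks and interleaving them
-- round-robin, instead of A's strided index assignment into a preallocated array (alternative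
-- decomposition, same O(n) cost).

-- ===== PORT A =====
-- loop body of A's inner `for result_position in range(offset, len(...), step_size)`:
-- state = (unscrambled_chars, scrambled_index); a Python list element "" is modelled as []
def aStep (cs : List Char) (st : List (List Char) × Int) (pos : Int) : List (List Char) × Int :=
  (st.1.set pos.toNat [PySem.List.pyGetD cs st.2 ' '], st.2 + 1)
  -- pos is always a valid index and st.2 always in range (proved below), so Python never raises

def unscramble_token_py (token : String) : String :=
  if PySem.Str.endswith token "fNs" = false then token
  else
    let scrambled : List Char := PySem.List.slice token.toList none (some (-3))  -- token[:-len("fNs")]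
    let init : List (List Char) := List.replicate scrambled.length []            -- [""] * len(scrambled)
    let res := (PySem.List.pyRange 0 7).foldl
      (fun st offset => (PySem.List.pyRange offset (scrambled.length : Int) 7).foldl (aStep scrambled) st)
      (init, 0)
    String.ofList (PySem.Chars.join [] res.1)                                        -- "".join(...)

-- ===== PORT B =====
-- pass-1 body: state = (chunks, cursor)
def bChunkStep (s : List Char) (st : List (List Char) × Int) (i : Int) : List (List Char) × Int :=
  let size : Int := ((PySem.List.pyRange i (s.length : Int) 7).length : Int)     -- len(range(i, n, 7))
  (st.1 ++ [PySem.List.slice s (some st.2) (some (st.2 + size))], st.2 + size)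

-- pass-2 inner body: `if q < len(c): out.append(c[q])`
def bPick (q : Int) (acc : List Char) (c : List Char) : List Char :=
  if q < (c.length : Int) then acc ++ [PySem.List.pyGetD c q ' '] else acc
  -- the guard keeps q in range, so Python's c[q] never raises

def unscramble_token_py_alt (token : String) : String :=
  if PySem.Str.endswith token "fNs" = false then token
  else
    let s : List Char := PySem.List.slice token.toList none (some (-3))          -- token[:-3]
    let chunks := ((PySem.List.pyRange 0 7).foldl (bChunkStep s) ([], 0)).1
    let out := (PySem.List.pyRange 0 (PySem.Int.floordiv ((s.length : Int) + 6) 7)).foldl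
      (fun acc q => chunks.foldl (bPick q) acc) []
    String.ofList (PySem.Chars.join [] (out.map (fun c => [c])))                     -- "".join(out)

-- ===== PRECONDITION & SPEC =====
def Spec_unscramble_token_py (token : String) (out : String) : Prop := out = unscramble_token_py_alt token
instance (token : String) (out : String) : Decidable (Spec_unscramble_token_py token out) := by unfold Spec_unscramble_token_py; infer_instance

-- ===== CLAIM (what is proved, stated in full; the proofs are below) =====
def Claim_equal_unscramble_token_py : Prop := ∀ (token : String), Dom_unscramble_token_py token → Spec_unscramble_token_py token (unscramble_token_py token)

-- ===== LEMMAS AND PROOFS =====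

-- length of the j-th stride chunk, len(range(j, n, 7))
def pvL (n j : Nat) : Nat := (n + 6 - j) / 7
-- start of the j-th stride chunk inside the scrambled string
def pvC (n : Nat) : Nat → Nat
  | 0 => 0
  | j+1 => pvC n j + pvL n j
-- the character that ends up at position p of the unscrambled string
def pvG (cs : List Char) (p : Nat) : Char := cs.getD (pvC cs.length (p % 7) + p / 7) ' '
def pvSpec (cs : List Char) : List Char := (List.range cs.length).map (pvG cs)
def pvChunk (cs : List Char) (j : Nat) : List Char :=
  (cs.drop (pvC cs.length j)).take (pvL cs.length j)
def pvRound (cs : List Char) (q : Nat) : List Char :=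
  (List.range (min 7 (cs.length - 7*q))).map (fun j => cs.getD (pvC cs.length j + q) ' ')

lemma pyRange_strided (n j : Nat) :
    PySem.List.pyRange (j:ℤ) (n:ℤ) 7 = (List.range (pvL n j)).map (fun (k : Nat) => (j:ℤ) + 7*(k:ℤ)) := by
  rw [PySem.List.pyRange_of_pos _ _ (by norm_num : (0:ℤ) < 7)]
  have h : (if (j:ℤ) < (n:ℤ) then (((n:ℤ)-(j:ℤ)+7-1)/7).toNat else 0) = pvL n j := by
    unfold pvL; split_ifs <;> omega
  rw [h]

lemma pyRange07 : PySem.List.pyRange 0 7 = (List.range 7).map (fun (k : Nat) => (k:ℤ)) := by decide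

lemma pyRange0 (m : Nat) : PySem.List.pyRange 0 (m:ℤ) = (List.range m).map (fun (k : Nat) => (k:ℤ)) := by
  rw [PySem.List.pyRange_of_pos _ _ (by norm_num : (0:ℤ) < 1)]
  have h : (if (0:ℤ) < (m:ℤ) then (((m:ℤ)-0+1-1)/1).toNat else 0) = m := by split_ifs <;> omega
  rw [h]
  apply List.map_congr_left
  intro k _
  ring

lemma pvC7 (n : Nat) : pvC n 7 = n := by
  obtain ⟨q, r, hr, rfl⟩ : ∃ q r, r < 7 ∧ n = 7*q + r :=
    ⟨n/7, n%7, Nat.mod_lt _ (by norm_num), (Nat.div_add_mod n 7).symm⟩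
  have h : ∀ c : Nat, c ≤ 6 → (7*q + r + 6 - c)/7 = q + (r + 6 - c)/7 := by
    intro c hc
    have h2 : 7*q + r + 6 - c = 7*q + (r + 6 - c) := by omega
    rw [h2, Nat.mul_add_div (by norm_num)]
  simp only [pvC, pvL]
  rw [h 0 (by norm_num), h 1 (by norm_num), h 2 (by norm_num), h 3 (by norm_num),
      h 4 (by norm_num), h 5 (by norm_num), h 6 (by norm_num)]
  interval_cases r <;> omega

lemma pvC_mono (n : Nat) {j k : Nat} (h : j ≤ k) : pvC n j ≤ pvC n k := by
  induction k with
  | zero => simp [Nat.le_zero.mp h]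
  | succ k ih =>
    rcases Nat.lt_or_ge j (k+1) with h1 | h1
    · exact le_trans (ih (by omega)) (by simp [pvC])
    · have h2 : j = k+1 := by omega
      simp [h2]

lemma pvC_add_le (n j : Nat) (hj : j < 7) : pvC n j + pvL n j ≤ n := by
  have h : pvC n (j+1) ≤ pvC n 7 := pvC_mono n (by omega)
  rw [pvC7] at h
  simp only [pvC] at h
  exact h

-- ---------- A side ----------

lemma innerA (cs : List Char) (j : Nat) (hj : j < 7) (m : Nat) :
    ∀ (arr : List (List Char)) (c : Nat), arr.length = cs.length →
    (((List.range m).map (fun (k : Nat) => (j:ℤ) + 7*(k:ℤ))).foldl (aStep cs) (arr, (c:ℤ))).2 = ((c + m : Nat) : ℤ) ∧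
    (((List.range m).map (fun (k : Nat) => (j:ℤ) + 7*(k:ℤ))).foldl (aStep cs) (arr, (c:ℤ))).1.length = cs.length ∧
    ∀ p, p < cs.length →
      (((List.range m).map (fun (k : Nat) => (j:ℤ) + 7*(k:ℤ))).foldl (aStep cs) (arr, (c:ℤ))).1.getD p [] =
        if p % 7 = j ∧ p / 7 < m then [cs.getD (c + p / 7) ' '] else arr.getD p [] := by
  induction m with
  | zero => intro arr c hlen; simp [hlen]
  | succ m ih =>
    intro arr c hlen
    obtain ⟨ih2, ihlen, ih1⟩ := ih arr c hlen
    rw [List.range_succ (n := m), List.map_append, List.foldl_append,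
        List.map_cons, List.map_nil, List.foldl_cons, List.foldl_nil]
    set r := ((List.range m).map (fun (k : Nat) => (j:ℤ) + 7*(k:ℤ))).foldl (aStep cs) (arr, (c:ℤ)) with hrdef
    have htn : ((j:ℤ) + 7*(m:ℤ)).toNat = j + 7*m := by omega
    have hget : PySem.List.pyGetD cs ((c + m : Nat) : ℤ) ' ' = cs.getD (c + m) ' ' := by
      simpa using PySem.List.pyGetD_natCast cs (c + m) ' '
    refine ⟨?_, ?_, ?_⟩
    · simp only [aStep, ih2]; push_cast; ring
    · simp [aStep, htn, ihlen]
    · intro p hp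
      simp only [aStep, htn, ih2, hget]
      rw [List.getD_eq_getElem?_getD, List.getElem?_set, ihlen]
      by_cases hpe : j + 7*m = p
      · have h7 : p % 7 = j ∧ p / 7 < m + 1 := by omega
        have hd : p / 7 = m := by omega
        rw [if_pos hpe, if_pos (hpe ▸ hp), Option.getD_some, if_pos h7, hd]
      · rw [if_neg hpe, ← List.getD_eq_getElem?_getD, ih1 p hp]
        have hiff : (p % 7 = j ∧ p / 7 < m + 1) ↔ (p % 7 = j ∧ p / 7 < m) := by
          constructor
          · rintro ⟨h1, h2⟩; exact ⟨h1, by omega⟩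
          · rintro ⟨h1, h2⟩; exact ⟨h1, by omega⟩
        simp only [hiff]

lemma outerA (cs : List Char) (t : Nat) (ht : t ≤ 7) :
    (((List.range t).map (fun (k : Nat) => (k:ℤ))).foldl
      (fun st offset => (PySem.List.pyRange offset (cs.length:ℤ) 7).foldl (aStep cs) st)
      (List.replicate cs.length [], (0:ℤ))).2 = ((pvC cs.length t : Nat) : ℤ) ∧
    (((List.range t).map (fun (k : Nat) => (k:ℤ))).foldl
      (fun st offset => (PySem.List.pyRange offset (cs.length:ℤ) 7).foldl (aStep cs) st)
      (List.replicate cs.length [], (0:ℤ))).1.length = cs.length ∧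
    ∀ p, p < cs.length →
      (((List.range t).map (fun (k : Nat) => (k:ℤ))).foldl
        (fun st offset => (PySem.List.pyRange offset (cs.length:ℤ) 7).foldl (aStep cs) st)
        (List.replicate cs.length [], (0:ℤ))).1.getD p [] =
        if p % 7 < t then [pvG cs p] else [] := by
  induction t with
  | zero =>
    refine ⟨by simp [pvC], by simp, ?_⟩
    intro p hp
    simp [List.getD_eq_getElem?_getD, hp]
  | succ t ih =>
    obtain ⟨ih2, ihlen, ih1⟩ := ih (by omega)
    rw [List.range_succ (n := t), List.map_append, List.foldl_append,
        List.map_cons, List.map_nil, List.foldl_cons, List.foldl_nil]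
    set r := (((List.range t).map (fun (k : Nat) => (k:ℤ))).foldl
      (fun st offset => (PySem.List.pyRange offset (cs.length:ℤ) 7).foldl (aStep cs) st)
      (List.replicate cs.length [], (0:ℤ))) with hrdef
    have hr : r = (r.1, ((pvC cs.length t : Nat) : ℤ)) := by
      rw [← ih2]
    rw [hr, pyRange_strided cs.length t]
    obtain ⟨h2, hlen, h1⟩ := innerA cs t (by omega) (pvL cs.length t) r.1 (pvC cs.length t) ihlen
    refine ⟨by rw [h2]; norm_cast, hlen, ?_⟩
    intro p hp
    rw [h1 p hp]
    by_cases hc : p % 7 = t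
    · have hdiv : p / 7 < pvL cs.length t := by
        unfold pvL; omega
      rw [if_pos ⟨hc, hdiv⟩, if_pos (by omega : p % 7 < t + 1)]
      unfold pvG
      rw [hc]
    · rw [if_neg (by tauto), ih1 p hp]
      have hiff : (p % 7 < t + 1) ↔ (p % 7 < t) := by omega
      simp only [hiff]

lemma A_res (cs : List Char) :
    ((PySem.List.pyRange 0 7).foldl
      (fun st offset => (PySem.List.pyRange offset (cs.length:ℤ) 7).foldl (aStep cs) st)
      (List.replicate cs.length [], (0:ℤ))).1 = (pvSpec cs).map (fun c => [c]) := by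
  rw [pyRange07]
  obtain ⟨-, hlen, h1⟩ := outerA cs 7 (le_refl _)
  apply List.ext_getElem
  · rw [hlen]; simp [pvSpec]
  · intro p hp hp'
    have hpn : p < cs.length := by rw [← hlen]; exact hp
    have h := h1 p hpn
    rw [List.getD_eq_getElem?_getD, List.getElem?_eq_getElem hp, Option.getD_some,
        if_pos (by omega : p % 7 < 7)] at h
    rw [h]
    simp [pvSpec]

-- ---------- B side ----------

lemma chunk_len (cs : List Char) (j : Nat) (hj : j < 7) :
    (pvChunk cs j).length = pvL cs.length j := by
  have h := pvC_add_le cs.length j hj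
  simp only [pvChunk, List.length_take, List.length_drop]
  omega

lemma B_chunks (cs : List Char) (t : Nat) :
    ((List.range t).map (fun (k : Nat) => (k:ℤ))).foldl (bChunkStep cs) ([], (0:ℤ)) =
      ((List.range t).map (pvChunk cs), ((pvC cs.length t : Nat) : ℤ)) := by
  induction t with
  | zero => simp [pvC]
  | succ t ih =>
    rw [List.range_succ (n := t), List.map_append, List.foldl_append, ih,
        List.map_cons, List.map_nil, List.foldl_cons, List.foldl_nil]
    simp only [bChunkStep, pyRange_strided cs.length t, List.length_map, List.length_range]
    rw [List.map_append, Prod.mk.injEq]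
    constructor
    · simp only [List.map_cons, List.map_nil, List.append_cancel_left_eq]
      have hcast : ((pvC cs.length t : Nat) : ℤ) + ((pvL cs.length t : Nat) : ℤ)
          = (((pvC cs.length t + pvL cs.length t : Nat)) : ℤ) := by push_cast; ring
      rw [hcast, PySem.List.slice_natCast]
      simp [pvChunk]
    · simp only [pvC]; push_cast; ring

lemma pick_fold (q : Nat) (l : List (List Char)) (acc : List Char) :
    l.foldl (bPick (q:ℤ)) acc = acc ++ (l.filter (fun c => q < c.length)).map (fun c => c.getD q ' ') := by
  induction l generalizing acc with
  | nil => simp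
  | cons c l ih =>
    by_cases h : q < c.length
    · have hq : ((q:ℤ) < (c.length : ℤ)) := by exact_mod_cast h
      have hget : PySem.List.pyGetD c (q:ℤ) ' ' = c.getD q ' ' := by
        simpa using PySem.List.pyGetD_natCast c q ' '
      simp [bPick, h, hq, ih, hget]
    · have hq : ¬ ((q:ℤ) < (c.length : ℤ)) := by exact_mod_cast h
      simp [bPick, h, hq, ih]

lemma filter_range_lt (a r : Nat) :
    (List.range a).filter (fun j => j < r) = List.range (min a r) := by
  induction a with
  | zero => simp
  | succ a ih =>
    rw [List.range_succ (n := a), List.filter_append, ih]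
    by_cases h : a < r
    · have h1 : min (a+1) r = (min a r) + 1 := by omega
      have h2 : min a r = a := by omega
      simp [h, h2, List.range_succ]
    · have h1 : min (a+1) r = min a r := by omega
      simp [h, h1]

lemma pvRound_eq (cs : List Char) (q : Nat) :
    (((List.range 7).map (pvChunk cs)).filter (fun c => q < c.length)).map (fun c => c.getD q ' ')
      = pvRound cs q := by
  rw [List.filter_map]
  have hf : (List.range 7).filter ((fun c => decide (q < c.length)) ∘ pvChunk cs)
      = (List.range 7).filter (fun j => j < cs.length - 7*q) := by
    apply List.filter_congr
    intro j hj
    have hj7 : j < 7 := by simpa using hj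
    rw [Function.comp_apply, chunk_len cs j hj7]
    simp only [decide_eq_decide]
    unfold pvL
    omega
  rw [hf, filter_range_lt, List.map_map, pvRound]
  apply List.map_congr_left
  intro j hj
  have hj' : j < min 7 (cs.length - 7*q) := by simpa using hj
  have hj7 : j < 7 := by omega
  have hq : q < pvL cs.length j := by unfold pvL; omega
  simp only [Function.comp_apply, pvChunk]
  rw [List.getD_eq_getElem?_getD, List.getElem?_take, if_pos hq, List.getElem?_drop,
      ← List.getD_eq_getElem?_getD]

lemma B_out (cs : List Char) (t : Nat) :
    ((List.range t).map (fun (k : Nat) => (k:ℤ))).foldl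
        (fun acc q => ((List.range 7).map (pvChunk cs)).foldl (bPick q) acc) [] =
      (List.range t).flatMap (pvRound cs) := by
  induction t with
  | zero => simp
  | succ t ih =>
    rw [List.range_succ (n := t), List.map_append, List.foldl_append, ih,
        List.map_cons, List.map_nil, List.foldl_cons, List.foldl_nil,
        pick_fold, pvRound_eq, List.flatMap_append]
    simp

lemma flat_rounds (cs : List Char) (t : Nat) (ht : t ≤ (cs.length + 6)/7) :
    (List.range t).flatMap (pvRound cs) = (List.range (min (7*t) cs.length)).map (pvG cs) := by
  induction t with
  | zero => simp
  | succ t ih =>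
    rw [List.range_succ (n := t), List.flatMap_append, ih (by omega)]
    simp only [List.flatMap_cons, List.flatMap_nil, List.append_nil]
    have h7t : 7*t ≤ cs.length := by omega
    have hmin : min (7*t) cs.length = 7*t := by omega
    have hmin2 : min (7*(t+1)) cs.length = 7*t + min 7 (cs.length - 7*t) := by omega
    rw [hmin, hmin2, List.range_add, List.map_append]
    congr 1
    rw [pvRound, List.map_map]
    apply List.map_congr_left
    intro j hj
    have hj' : j < min 7 (cs.length - 7*t) := by simpa using hj
    have hmod : (7*t + j) % 7 = j := by omega
    have hdiv : (7*t + j) / 7 = t := by omega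
    simp [pvG, hmod, hdiv]

lemma B_res (cs : List Char) :
    (PySem.List.pyRange 0 (PySem.Int.floordiv ((cs.length:ℤ) + 6) 7)).foldl
        (fun acc q => (((PySem.List.pyRange 0 7).foldl (bChunkStep cs) ([], 0)).1).foldl (bPick q) acc) []
      = pvSpec cs := by
  have hM : PySem.Int.floordiv ((cs.length:ℤ) + 6) 7 = (((cs.length + 6)/7 : Nat) : ℤ) := by
    have h := PySem.Int.floordiv_natCast (cs.length + 6) 7
    push_cast at h ⊢
    exact h
  have hch : ((PySem.List.pyRange 0 7).foldl (bChunkStep cs) ([], (0:ℤ))).1 = (List.range 7).map (pvChunk cs) := by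
    rw [pyRange07, B_chunks]
  rw [hM, pyRange0, hch, B_out, flat_rounds cs _ (le_refl _)]
  have h : min (7*((cs.length + 6)/7)) cs.length = cs.length := by omega
  rw [h, pvSpec]

-- ===== VERDICT (by name: the statement is the Claim_ definition above) =====
theorem unscramble_token_py_spec : Claim_equal_unscramble_token_py := by
  intro token _
  unfold Spec_unscramble_token_py
  simp only [unscramble_token_py, unscramble_token_py_alt]
  by_cases h : PySem.Str.endswith token "fNs" = false
  · rw [if_pos h, if_pos h]
  · rw [if_neg h, if_neg h, A_res, B_res]
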